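-- pv_equiv track=rewrite | github.com/pznikola/pfe_mart_2026 | wrapper/jtag_uart_raw.py | format_rx_string
-- ===== SOURCE A (Python) =====
-- def format_rx_string(data):
--     """Convert received bytes to a printable string."""
--     result = []
--     for b in data:
--         if 0x20 <= b <= 0x7E:
--             result.append(chr(b))
--         else:
--             result.append("\\x{:02X}".format(b))
--     return "".join(result)
-- ===== SOURCE B (Python) =====
-- def format_rx_string(data):
--     """Convert received bytes to a printable string."""
--     out = []
--     i, n = 0, len(data)
--     while i < n:
--         p = 0x20 <= data[i] <= 0x7E
--         j = i + 1
--         while j < n and (0x20 <= data[j] <= 0x7E) == p: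
--             j += 1
--         run = data[i:j]
--         if p:
--             out.append(''.join(map(chr, run)))
--         else:
--             out.append(''.join('\\x{:02X}'.format(b) for b in run))
--         i = j
--     return ''.join(out)
-- ===== Notes on version B (the rewrite author's own statement) =====
-- stated objective: alternative
-- what changed: B is a run-based two-pointer scan: it finds each maximal run of same-printability bytes with an inner pointer, converts the whole run at once (a chr-map for printable runs, an escape-map for the rest), and joins the run strings, instead of A's single per-byte branch-and-append loop.
import Mathlib
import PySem

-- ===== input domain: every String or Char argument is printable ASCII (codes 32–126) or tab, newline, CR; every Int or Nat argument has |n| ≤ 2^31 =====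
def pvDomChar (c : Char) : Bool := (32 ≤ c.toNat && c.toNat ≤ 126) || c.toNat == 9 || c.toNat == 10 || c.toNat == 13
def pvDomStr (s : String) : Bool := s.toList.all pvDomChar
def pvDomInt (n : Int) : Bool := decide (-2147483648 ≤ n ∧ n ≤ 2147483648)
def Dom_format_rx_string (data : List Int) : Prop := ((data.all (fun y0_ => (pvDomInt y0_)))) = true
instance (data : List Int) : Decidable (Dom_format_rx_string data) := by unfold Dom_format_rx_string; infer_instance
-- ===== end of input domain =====

-- B replaces A's per-byte branch-and-append loop with a run-based two-pointer scan that
-- converts each maximal same-printability run at once (alternative decomposition, same cost).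


-- ===== PORT A =====
-- "{:02X}".format(b): uppercase hex, zero-padded to width 2 (sign counts toward the width).
-- Shared port of the Python `format` builtin, called by both A and B.
def pvHexStr (n : Nat) : String := String.ofList ((Nat.toDigits 16 n).map Char.toUpper)

def pvFormat02X (b : Int) : String :=
  if b < 0 then "-" ++ pvHexStr b.natAbs
  else
    let s := pvHexStr b.toNat
    if s.length < 2 then "0" ++ s else s

def format_rx_string (data : List Int) : String :=
  let result := data.foldl (fun acc b =>
    acc ++ [if 32 ≤ b ∧ b ≤ 126 then String.singleton (Char.ofNat b.toNat)
            else "\\x" ++ pvFormat02X b]) []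
  String.join result

-- ===== PORT B =====
def pvPrintable (b : Int) : Bool := decide (32 ≤ b ∧ b ≤ 126)

-- the outer while loop of Source B: peel off one maximal run of bytes whose printability equals
-- that of the head (the inner `while j < n and … == p` scan is the takeWhile/dropWhile span),
-- convert the whole run at once, recurse on the remainder.
def pvRuns (xs : List Int) : String :=
  match xs with
  | [] => ""
  | b :: rest =>
    let p := pvPrintable b
    let run := b :: rest.takeWhile (fun x => pvPrintable x == p)
    let rest' := rest.dropWhile (fun x => pvPrintable x == p)
    (if p then String.join (run.map (fun x => String.singleton (Char.ofNat x.toNat)))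
     else String.join (run.map (fun x => "\\x" ++ pvFormat02X x))) ++ pvRuns rest'
termination_by xs.length
decreasing_by
  simpa using Nat.lt_succ_of_le (rest.length_dropWhile_le (fun x => pvPrintable x == pvPrintable b))

def format_rx_string_alt (data : List Int) : String := pvRuns data

-- ===== PRECONDITION & SPEC =====
def Spec_format_rx_string (data : List Int) (out : String) : Prop := out = format_rx_string_alt data
instance (data : List Int) (out : String) : Decidable (Spec_format_rx_string data out) := by unfold Spec_format_rx_string; infer_instance

-- ===== CLAIM (what is proved, stated in full; the proofs are below) =====
def Claim_equal_format_rx_string : Prop := ∀ (data : List Int), Dom_format_rx_string data → Spec_format_rx_string data (format_rx_string data)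

-- ===== LEMMAS AND PROOFS =====

-- A's per-byte output fragment
def pvFrag (b : Int) : String :=
  if 32 ≤ b ∧ b ≤ 126 then String.singleton (Char.ofNat b.toNat) else "\\x" ++ pvFormat02X b

theorem pvFrag_of_printable (x : Int) (h : pvPrintable x = true) :
    pvFrag x = String.singleton (Char.ofNat x.toNat) := by
  simp [pvPrintable] at h
  simp [pvFrag, h]

theorem pvFrag_of_not_printable (x : Int) (h : pvPrintable x = false) :
    pvFrag x = "\\x" ++ pvFormat02X x := by
  simp [pvPrintable] at h
  rw [pvFrag, if_neg (by omega)]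

theorem pvJoin_foldl (l : List String) (a : String) :
    l.foldl (fun r s => r ++ s) a = a ++ String.join l := by
  induction l generalizing a with
  | nil => simp [String.join]
  | cons s t ih => simp only [List.foldl, String.join]; rw [ih, ih]; simp [String.append_assoc]

theorem pvJoin_cons (s : String) (l : List String) :
    String.join (s :: l) = s ++ String.join l := by
  show (s :: l).foldl (fun r s => r ++ s) "" = _
  rw [List.foldl_cons, pvJoin_foldl]; simp

theorem pvJoin_append (l1 l2 : List String) :
    String.join (l1 ++ l2) = String.join l1 ++ String.join l2 := by
  induction l1 with
  | nil => simp [String.join]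
  | cons s t ih => rw [List.cons_append, pvJoin_cons, ih, pvJoin_cons, String.append_assoc]

theorem pvRuns_eq (xs : List Int) : pvRuns xs = String.join (xs.map pvFrag) := by
  induction xs using pvRuns.induct with
  | case1 => simp [pvRuns, String.join]
  | case2 b rest p rest' ih =>
    rw [pvRuns]
    have ih' : pvRuns (rest.dropWhile (fun x => pvPrintable x == pvPrintable b))
        = String.join ((rest.dropWhile (fun x => pvPrintable x == pvPrintable b)).map pvFrag) := ih
    conv_rhs => rw [show rest = rest.takeWhile (fun x => pvPrintable x == pvPrintable b) ++
        rest.dropWhile (fun x => pvPrintable x == pvPrintable b) from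
      (List.takeWhile_append_dropWhile).symm]
    rw [ih']
    simp only [List.map_cons, List.map_append, pvJoin_cons, pvJoin_append]
    rw [← String.append_assoc]
    congr 1
    cases hp : pvPrintable b with
    | true =>
      rw [if_pos rfl, pvFrag_of_printable b hp]
      congr 2
      apply List.map_congr_left
      intro x hx
      have hx' := List.mem_takeWhile_imp hx
      simp at hx'
      exact (pvFrag_of_printable x hx').symm
    | false =>
      rw [if_neg (by simp), pvFrag_of_not_printable b hp]
      congr 2
      apply List.map_congr_left
      intro x hx
      have hx' := List.mem_takeWhile_imp hx
      simp at hx'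
      exact (pvFrag_of_not_printable x hx').symm

-- A's append-accumulator loop builds exactly the map of the per-byte fragments
theorem pvFoldl_map {α β : Type} (f : α → β) (xs : List α) (acc : List β) :
    xs.foldl (fun a b => a ++ [f b]) acc = acc ++ xs.map f := by
  induction xs generalizing acc with
  | nil => simp
  | cons x t ih => simp [List.foldl, ih]

-- ===== VERDICT (by name: the statement is the Claim_ definition above) =====
theorem format_rx_string_spec : Claim_equal_format_rx_string := by
  intro data _
  unfold Spec_format_rx_string format_rx_string format_rx_string_alt
  rw [pvFoldl_map, List.nil_append, pvRuns_eq]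
  rfl
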